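-- pv_equiv track=rewrite | github.com/kepiCHelaSHen/context-hacking | experiments/mathematics/cat-time-sprint/binary_splitting/compute_e_fast.py | binary_split_e
-- ===== SOURCE A (Python) =====
-- def binary_split_e(a: int, b: int) -> tuple:
--     """Binary splitting for e = sum(1/n!).
--     Returns (P, Q) where the partial sum over [a, b) equals P/Q.
--
--     Base case: for interval [a, a+1):
--       term = 1/a! contributes: P=1, Q=a (for a>0), or P=1, Q=1 (for a=0)
--
--     Actually, we compute:
--       sum_{k=a}^{b-1} 1/k! = P(a,b) / Q(a,b)
--     where Q(a,b) = product of k for k in [a..b-1] (with 0! = 1)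
--     """
--     if b - a == 1:
--         if a == 0:
--             return (1, 1)  # 1/0! = 1
--         else:
--             return (1, a)  # 1/a! partial: numerator=1, factor=a
--     m = (a + b) // 2
--     p_left, q_left = binary_split_e(a, m)
--     p_right, q_right = binary_split_e(m, b)
--     return (p_left * q_right + p_right, q_left * q_right)
-- ===== SOURCE B (Python) =====
-- def binary_split_e(a: int, b: int) -> tuple:
--     """Linear accumulation of the same (P, Q) pair: Q is the product of the
--     factors k (with 0 -> 1) over [a, b), and P = Q * sum 1/k!, built left to
--     right with P = P*f + 1, Q = Q*f."""
--     P, Q = 0, 1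
--     for i in range(a, b):
--         f = i if i != 0 else 1
--         P = P * f + 1
--         Q = Q * f
--     return (P, Q)
-- ===== Notes on version B (the rewrite author's own statement) =====
-- stated objective: simpler
-- what changed: Replaces the recursive binary-splitting tree with a single left-to-right loop maintaining (P, Q) via P = P*f + 1, Q = Q*f, which yields the identical integer pair because Q is the split-independent product of factors and P is determined by it.
import Mathlib
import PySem

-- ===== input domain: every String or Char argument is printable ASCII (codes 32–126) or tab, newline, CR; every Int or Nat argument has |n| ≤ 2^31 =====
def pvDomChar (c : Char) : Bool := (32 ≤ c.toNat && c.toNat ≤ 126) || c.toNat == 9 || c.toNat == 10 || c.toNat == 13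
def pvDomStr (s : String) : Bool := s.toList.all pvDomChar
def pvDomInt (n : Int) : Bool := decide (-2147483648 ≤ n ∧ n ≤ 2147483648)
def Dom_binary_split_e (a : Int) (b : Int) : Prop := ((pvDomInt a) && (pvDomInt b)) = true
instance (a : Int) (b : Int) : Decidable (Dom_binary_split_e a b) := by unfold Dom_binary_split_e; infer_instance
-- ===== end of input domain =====

-- B replaces A's recursive binary splitting with a single left-to-right loop over
-- range(a, b) maintaining (P, Q); objective: simpler. A raises RecursionError when
-- b <= a; that region is excluded by Pre_ (B's loop would return (0, 1) there).


-- ===== PORT A =====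
-- Literal port of the recursive binary splitting. In Python the recursion never
-- terminates for b - a ≤ 0 (RecursionError); that region is outside Pre_ below,
-- and the port returns (0, 1) there only to be total (the dite's else-else arm).
def binary_split_e (a : Int) (b : Int) : Int × Int :=
  if b - a ≤ 1 then
    if b - a = 1 then
      (if a = 0 then (1, 1) else (1, a))
    else (0, 1)
  else
    let m := PySem.Int.floordiv (a + b) 2
    let l := binary_split_e a m
    let r := binary_split_e m b
    (l.1 * r.2 + r.1, l.2 * r.2)
termination_by (b - a).toNat
decreasing_by
  · have hm : PySem.Int.floordiv (a + b) 2 = (a + b) / 2 :=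
      PySem.Int.floordiv_eq_ediv_of_pos (by omega)
    simp only [hm]; omega
  · have hm : PySem.Int.floordiv (a + b) 2 = (a + b) / 2 :=
      PySem.Int.floordiv_eq_ediv_of_pos (by omega)
    simp only [hm]; omega

-- ===== PORT B =====
-- one loop step: f = i if i != 0 else 1;  P = P*f + 1;  Q = Q*f
def pvStep (pq : Int × Int) (i : Int) : Int × Int :=
  let f := if i ≠ 0 then i else 1
  (pq.1 * f + 1, pq.2 * f)

def binary_split_e_alt (a : Int) (b : Int) : Int × Int :=
  (PySem.List.pyRange a b 1).foldl pvStep (0, 1)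

-- ===== PRECONDITION & SPEC =====
-- Python A recurses forever (RecursionError) whenever b - a ≤ 0: the base case
-- b - a == 1 is never reached. Pre_ keeps exactly the inputs where A returns.
def Pre_binary_split_e (a : Int) (b : Int) : Prop := a < b
instance (a : Int) (b : Int) : Decidable (Pre_binary_split_e a b) := by unfold Pre_binary_split_e; infer_instance
def pvWitness_binary_split_e : Int × Int := (0, 6)

def Spec_binary_split_e (a : Int) (b : Int) (out : Int × Int) : Prop := out = binary_split_e_alt a b
instance (a : Int) (b : Int) (out : Int × Int) : Decidable (Spec_binary_split_e a b out) := by unfold Spec_binary_split_e; infer_instance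

-- ===== CLAIM (what is proved, stated in full; the proofs are below) =====
def Claim_equal_binary_split_e : Prop := ∀ (a : Int) (b : Int), Dom_binary_split_e a b → Pre_binary_split_e a b → Spec_binary_split_e a b (binary_split_e a b)

-- ===== LEMMAS AND PROOFS =====

-- Folding pvStep from an arbitrary state (P, Q) is the linear image of the fold
-- from (0, 1): P' = P*q + p, Q' = Q*q where (p, q) is the fold from (0, 1).
theorem pvFold_shift (l : List Int) (P Q : Int) :
    l.foldl pvStep (P, Q) =
      (P * (l.foldl pvStep (0, 1)).2 + (l.foldl pvStep (0, 1)).1,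
       Q * (l.foldl pvStep (0, 1)).2) := by
  induction l generalizing P Q with
  | nil => simp
  | cons x l ih =>
    simp only [List.foldl_cons]
    rw [ih (pvStep (P, Q) x).1 (pvStep (P, Q) x).2, ih (pvStep (0, 1) x).1 (pvStep (0, 1) x).2]
    simp only [pvStep, Prod.mk.injEq]
    constructor <;> ring

theorem pvMain (n : Nat) : ∀ (a b : Int), (b - a).toNat = n → a < b →
    binary_split_e a b = binary_split_e_alt a b := by
  induction n using Nat.strong_induction_on with
  | _ n ih =>
    intro a b hn hab
    rw [binary_split_e]
    by_cases h1 : b - a ≤ 1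
    · have hb : b = a + 1 := by omega
      subst hb
      simp only [binary_split_e_alt, PySem.List.pyRange_one_singleton, List.foldl_cons,
        List.foldl_nil, pvStep]
      by_cases ha : a = 0 <;> simp [ha]
    · have hm : PySem.Int.floordiv (a + b) 2 = (a + b) / 2 :=
        PySem.Int.floordiv_eq_ediv_of_pos (by omega)
      simp only [if_neg h1, hm]
      set m : Int := (a + b) / 2 with hmdef
      have ham : a < m := by omega
      have hmb : m < b := by omega
      rw [ih (m - a).toNat (by omega) a m rfl ham,
          ih (b - m).toNat (by omega) m b rfl hmb]
      simp only [binary_split_e_alt]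
      rw [PySem.List.pyRange_one_append a m b (le_of_lt ham) (le_of_lt hmb),
          List.foldl_append]
      rw [pvFold_shift (PySem.List.pyRange m b 1)
            ((PySem.List.pyRange a m 1).foldl pvStep (0, 1)).1
            ((PySem.List.pyRange a m 1).foldl pvStep (0, 1)).2]

-- ===== VERDICT (by name: the statement is the Claim_ definition above) =====
theorem binary_split_e_spec : Claim_equal_binary_split_e := by
  intro a b _ hpre
  exact pvMain (b - a).toNat a b rfl hpre
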